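-- pv_equiv track=rewrite | github.com/avishek376/Scaler-Problem-Solving | Intermediate/Intermediate DSA: Maths - Modular Arthimetic Introduction/Assignments/Q2. Mod Array/Mod Array.py | solve
-- ===== SOURCE A (Python) =====
-- def solve(A, B):
--     t = 1
--     n = len(A)
--     summ = 0
--     for i in range(n-1,-1,-1):
--         summ = (summ+A[i]*t)%B
--         t = (t*10)%B
--     return summ
-- ===== SOURCE B (Python) =====
-- def solve(A, B):
--     summ = 0
--     for d in A:
--         summ = (summ * 10 + d) % B
--     return summ
-- ===== Notes on version B (the rewrite author's own statement) =====
-- stated objective: idiomatic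
-- what changed: Replaces the reverse index loop that maintains a separate power-of-ten accumulator t by a forward left-to-right Horner scan over the elements, keeping a single modular state (one % per step instead of two).
import Mathlib
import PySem

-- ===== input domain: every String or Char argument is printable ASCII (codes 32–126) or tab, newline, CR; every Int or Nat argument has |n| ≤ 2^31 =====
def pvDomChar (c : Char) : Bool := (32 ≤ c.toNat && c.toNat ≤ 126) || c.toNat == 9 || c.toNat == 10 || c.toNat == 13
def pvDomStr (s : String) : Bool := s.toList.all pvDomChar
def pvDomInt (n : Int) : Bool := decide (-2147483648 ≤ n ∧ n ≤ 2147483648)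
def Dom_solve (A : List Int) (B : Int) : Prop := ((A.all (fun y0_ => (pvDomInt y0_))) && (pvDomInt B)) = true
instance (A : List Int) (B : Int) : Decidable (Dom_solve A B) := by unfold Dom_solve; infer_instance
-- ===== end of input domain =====

-- B replaces the reverse index loop with an extra power-of-ten accumulator by a forward Horner scan (idiomatic; same O(n) cost).


-- ===== PORT A =====
-- reverse index loop 'for i in range(n-1,-1,-1)' carrying the pair (summ, t)
def solve (A : List Int) (B : Int) : Int :=
  -- n = len(A) inlined as (A.length : Int)
  ((PySem.List.pyRange ((A.length : Int) - 1) (-1) (-1)).foldl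
      (fun (st : Int × Int) i =>
        (PySem.Int.mod (st.1 + PySem.List.pyGetD A i 0 * st.2) B,
         PySem.Int.mod (st.2 * 10) B))
      ((0 : Int), (1 : Int))).1

-- ===== PORT B =====
-- forward Horner scan: summ = (summ*10 + d) % B for each d in A
def solve_alt (A : List Int) (B : Int) : Int :=
  A.foldl (fun summ d => PySem.Int.mod (summ * 10 + d) B) 0

-- ===== PRECONDITION & SPEC =====
-- Pre_ excludes exactly B = 0 with a nonempty A, on which Python's '%' raises ZeroDivisionError
-- (with A = [] the loop body never runs, so both return 0 even for B = 0).
def Pre_solve (A : List Int) (B : Int) : Prop := A = [] ∨ B ≠ 0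
instance (A : List Int) (B : Int) : Decidable (Pre_solve A B) := by unfold Pre_solve; infer_instance
def pvWitness_solve : List Int × Int := ([1, 2, 3], 7)

def Spec_solve (A : List Int) (B : Int) (out : Int) : Prop := out = solve_alt A B
instance (A : List Int) (B : Int) (out : Int) : Decidable (Spec_solve A B out) := by unfold Spec_solve; infer_instance

-- ===== CLAIM (what is proved, stated in full; the proofs are below) =====
def Claim_equal_solve : Prop := ∀ (A : List Int) (B : Int), Dom_solve A B → Pre_solve A B → Spec_solve A B (solve A B)

-- ===== LEMMAS AND PROOFS =====

-- plain (unreduced) forward Horner value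
def pvNum (A : List Int) : Int := A.foldl (fun s d => s * 10 + d) 0

-- modular-context lemma: reducing the two summands mod B first does not change the result
theorem pv_fmod_ctx (a c e B : Int) : (a.fmod B + c * e.fmod B).fmod B = (a + c * e).fmod B := by
  have h : a + c * e = (a.fmod B + c * e.fmod B) + (a.fdiv B + c * e.fdiv B) * B := by
    have ha := Int.fmod_add_mul_fdiv a B
    have he := Int.fmod_add_mul_fdiv e B
    linear_combination -ha - c * he
  rw [h, Int.add_mul_fmod_self_right]

theorem pv_fmod_step (x d B : Int) : (x.fmod B * 10 + d).fmod B = (x * 10 + d).fmod B := by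
  have h : x * 10 + d = (x.fmod B * 10 + d) + (x.fdiv B * 10) * B := by
    have hx := Int.fmod_add_mul_fdiv x B
    linear_combination -10 * hx
  rw [h, Int.add_mul_fmod_self_right]

-- splitting the plain Horner fold at its accumulator
theorem pv_horner_split (L : List Int) : ∀ s : Int,
    L.foldl (fun s d => s * 10 + d) s = s * 10 ^ L.length + pvNum L := by
  induction L with
  | nil =>
      intro s
      simp only [List.foldl_nil, List.length_nil, pow_zero, pvNum, mul_one, add_zero]
  | cons e L ih =>
      intro s
      have h2 : pvNum (e :: L) = (0 * 10 + e) * 10 ^ L.length + pvNum L := ih (0 * 10 + e)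
      rw [List.foldl_cons, ih (s * 10 + e), h2, List.length_cons]
      ring

-- B-side: the modular Horner fold is the plain Horner value reduced, once the accumulator is reduced
theorem pv_alt_fold (B : Int) (L : List Int) : ∀ x : Int,
    L.foldl (fun summ d => PySem.Int.mod (summ * 10 + d) B) (x.fmod B)
      = (L.foldl (fun s d => s * 10 + d) x).fmod B := by
  induction L with
  | nil =>
      intro x
      simp only [List.foldl_nil]
  | cons d L ih =>
      intro x
      have hmod : ∀ a b : Int, PySem.Int.mod a b = a.fmod b := fun _ _ => rfl
      simp only [List.foldl_cons, hmod]
      rw [pv_fmod_step x d B]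
      exact ih (x * 10 + d)

-- A-side: processing L back-to-front with the (summ, t) pair yields (num mod, 10^len mod) for nonempty L
theorem pv_rev_fold (B : Int) (L : List Int) (hL : L ≠ []) :
    L.reverse.foldl
        (fun (st : Int × Int) d => ((st.1 + d * st.2).fmod B, (st.2 * 10).fmod B))
        ((0 : Int), (1 : Int))
      = ((pvNum L).fmod B, ((10 : Int) ^ L.length).fmod B) := by
  induction L with
  | nil => exact absurd rfl hL
  | cons d L ih =>
      by_cases h : L = []
      · subst h
        simp only [List.reverse_cons, List.reverse_nil, List.nil_append, List.foldl_cons,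
          List.foldl_nil, pvNum, List.length_cons, List.length_nil]
        norm_num
      · rw [List.reverse_cons, List.foldl_append, ih h]
        simp only [List.foldl_cons, List.foldl_nil, Prod.mk.injEq]
        refine ⟨?_, ?_⟩
        · rw [pv_fmod_ctx (pvNum L) d ((10 : Int) ^ L.length) B]
          have hnum : pvNum (d :: L) = d * 10 ^ L.length + pvNum L := by
            simpa [pvNum] using pv_horner_split L d
          rw [hnum, add_comm (d * 10 ^ L.length) (pvNum L)]
        · have h2 : (((10 : Int) ^ L.length).fmod B * 10).fmod B
              = ((10 : Int) ^ L.length * 10).fmod B := by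
            have := pv_fmod_ctx 0 10 ((10 : Int) ^ L.length) B
            simpa [mul_comm] using this
          rw [h2]
          norm_num [pow_succ]

-- ===== VERDICT (by name: the statement is the Claim_ definition above) =====
theorem solve_spec : Claim_equal_solve := by
  intro A B _ _
  unfold Spec_solve solve solve_alt
  have hmod : ∀ a b : Int, PySem.Int.mod a b = a.fmod b := fun _ _ => rfl
  have hrange : PySem.List.pyRange ((A.length : Int) - 1) (-1) (-1)
      = (PySem.List.pyRange 0 (A.length : Int)).reverse := by
    have := PySem.List.pyRange_neg_one_eq_reverse ((A.length : Int) - 1) (-1)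
    simpa using this
  rw [hrange]
  rw [show ((PySem.List.pyRange 0 ((A.length : Int))).reverse.foldl
        (fun (st : Int × Int) i =>
          (PySem.Int.mod (st.1 + PySem.List.pyGetD A i 0 * st.2) B,
           PySem.Int.mod (st.2 * 10) B)) ((0 : Int), (1 : Int)))
      = (((PySem.List.pyRange 0 ((A.length : Int))).reverse.map
            (fun j => PySem.List.pyGetD A j 0)).foldl
          (fun (st : Int × Int) d =>
            ((st.1 + d * st.2).fmod B, (st.2 * 10).fmod B)) ((0 : Int), (1 : Int)))
      from by rw [List.foldl_map]; simp [hmod]]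
  rw [List.map_reverse, PySem.List.map_pyGetD_pyRange_zero' A 0]
  cases hA : A with
  | nil => simp
  | cons d L =>
      rw [← hA, pv_rev_fold B A (by simp [hA])]
      have h0 : (0 : Int) = (0 : Int).fmod B := (Int.zero_fmod B).symm
      calc ((pvNum A).fmod B, ((10 : Int) ^ A.length).fmod B).1
          = (A.foldl (fun s d => s * 10 + d) 0).fmod B := rfl
        _ = A.foldl (fun summ d => PySem.Int.mod (summ * 10 + d) B) ((0 : Int).fmod B) :=
            (pv_alt_fold B A 0).symm
        _ = A.foldl (fun summ d => PySem.Int.mod (summ * 10 + d) B) 0 := by rw [← h0]
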